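-- pv_equiv track=rewrite | github.com/ArcanoxXx-01/Matematica_Numerica_Universidad_de_la_Habana_2023-2024 | cp00/DarioLopez/CodigoRespuestas.py | DerivarPol
-- ===== SOURCE A (Python) =====
-- def DerivarPol(exp,term,x,n):
--     result=0
--     for m in range(n):
--         for i in range(len(exp)):
--             if(exp[i]>=0):
--                 term[i]*=exp[i]
--                 exp[i]-=1
--     for i in range(len(exp)):
--         if(exp[i]>=0):
--             result+=term[i]*x**exp[i]
--     return result
-- ===== SOURCE B (Python) =====
-- def DerivarPol(exp, term, x, n):
--     k = n if n > 0 else 0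
--     total = 0
--     for e, t in zip(exp, term):
--         if e >= k:
--             c = t
--             for j in range(e, e - k, -1):
--                 c *= j
--             total += c * x ** (e - k)
--     return total
-- ===== Notes on version B (the rewrite author's own statement) =====
-- stated objective: alternative
-- what changed: Instead of n in-place derivative sweeps over the whole arrays followed by an evaluation pass, B evaluates in a single pass over zip(exp,term), multiplying each surviving term (exponent >= n) directly by its falling-factorial coefficient and shifting the exponent; terms with exponent < n are skipped.
import Mathlib
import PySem

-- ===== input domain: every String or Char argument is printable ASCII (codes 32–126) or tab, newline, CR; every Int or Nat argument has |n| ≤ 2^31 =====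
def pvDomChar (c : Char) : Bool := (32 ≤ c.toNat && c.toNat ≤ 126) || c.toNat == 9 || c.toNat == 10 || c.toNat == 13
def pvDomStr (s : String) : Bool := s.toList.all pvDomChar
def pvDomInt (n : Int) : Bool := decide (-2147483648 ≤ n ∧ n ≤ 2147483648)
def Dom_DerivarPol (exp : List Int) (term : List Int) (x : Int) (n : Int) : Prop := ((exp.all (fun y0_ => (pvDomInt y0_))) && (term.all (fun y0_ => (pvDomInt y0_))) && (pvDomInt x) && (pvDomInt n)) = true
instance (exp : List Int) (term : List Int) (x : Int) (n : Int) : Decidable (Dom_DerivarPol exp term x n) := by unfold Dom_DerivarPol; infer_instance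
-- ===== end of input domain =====

-- B replaces A's n in-place derivative sweeps by one direct pass applying the falling-factorial
-- coefficient per term. A mutates exp/term in place, B does not;
-- the equivalence proved here is about the RETURN value only.

-- ===== PORT A =====
-- body of A's inner loop: 'if exp[i]>=0: term[i]*=exp[i]; exp[i]-=1' on the state (exp, term)
def pvStepA (st : List Int × List Int) (i : Nat) : List Int × List Int :=
  if 0 ≤ st.1.getD i 0 then
    (st.1.set i (st.1.getD i 0 - 1), st.2.set i (st.2.getD i 0 * st.1.getD i 0))
  else st

def DerivarPol (exp : List Int) (term : List Int) (x : Int) (n : Int) : Int :=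
  -- for m in range(n): for i in range(len(exp)): …  (mutating exp and term)
  let st := (PySem.List.pyRange 0 n 1).foldl
      (fun st _ => (List.range st.1.length).foldl pvStepA st) (exp, term)
  -- for i in range(len(exp)): if exp[i]>=0: result += term[i]*x**exp[i]
  (List.range st.1.length).foldl
    (fun r i => if 0 ≤ st.1.getD i 0 then r + st.2.getD i 0 * x ^ (st.1.getD i 0).toNat else r) 0

-- ===== PORT B =====
def DerivarPol_alt (exp : List Int) (term : List Int) (x : Int) (n : Int) : Int :=
  let k := if 0 < n then n else 0
  (exp.zip term).foldl
    (fun total et =>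
      if k ≤ et.1 then
        total + ((PySem.List.pyRange et.1 (et.1 - k) (-1)).foldl (fun c j => c * j) et.2)
                  * x ^ (et.1 - k).toNat
      else total) 0

-- ===== PRECONDITION & SPEC =====
-- A raises IndexError exactly when some position i ≥ len(term), i < len(exp) carries a
-- nonnegative exponent (term[i] is then read); Pre_ excludes exactly those inputs.
def Pre_DerivarPol (exp : List Int) (term : List Int) (x : Int) (n : Int) : Prop :=
  ∀ a ∈ exp.drop term.length, a < 0
instance (exp : List Int) (term : List Int) (x : Int) (n : Int) : Decidable (Pre_DerivarPol exp term x n) := by unfold Pre_DerivarPol; infer_instance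

def pvWitness_DerivarPol : List Int × List Int × Int × Int := ([3, 1, -2], [5, 4, 7], 2, 1)

def Spec_DerivarPol (exp : List Int) (term : List Int) (x : Int) (n : Int) (out : Int) : Prop := out = DerivarPol_alt exp term x n
instance (exp : List Int) (term : List Int) (x : Int) (n : Int) (out : Int) : Decidable (Spec_DerivarPol exp term x n out) := by unfold Spec_DerivarPol; infer_instance

-- ===== CLAIM (what is proved, stated in full; the proofs are below) =====
def Claim_equal_DerivarPol : Prop := ∀ (exp : List Int) (term : List Int) (x : Int) (n : Int), Dom_DerivarPol exp term x n → Pre_DerivarPol exp term x n → Spec_DerivarPol exp term x n (DerivarPol exp term x n)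

-- ===== LEMMAS AND PROOFS =====

-- pointwise action of one derivative sweep on an exponent
def pvEF (a : Int) : Int := if 0 ≤ a then a - 1 else a

-- pointwise action of one derivative sweep on the coefficients
def pvTMap : List Int → List Int → List Int
  | _, [] => []
  | [], b :: t => b :: t
  | a :: e, b :: t => (if 0 ≤ a then b * a else b) :: pvTMap e t

-- falling factorial a(a-1)…(a-k+1)
def pvFF : Int → Nat → Int
  | _, 0 => 1
  | a, k+1 => a * pvFF (a-1) k

-- B's value, structurally: fold over the zipped lists with threshold k
def pvZ (x : Int) (k : Nat) : Int → List Int → List Int → Int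
  | r, [], _ => r
  | r, _ :: _, [] => r
  | r, a :: e, b :: t =>
      pvZ x k (if (k : Int) ≤ a then r + b * pvFF a k * x ^ (a - (k : Int)).toNat else r) e t

def pvInner (st : List Int × List Int) : List Int × List Int :=
  (List.range st.1.length).foldl pvStepA st

def pvFinal (x : Int) (st : List Int × List Int) : Int :=
  (List.range st.1.length).foldl
    (fun r i => if 0 ≤ st.1.getD i 0 then r + st.2.getD i 0 * x ^ (st.1.getD i 0).toNat else r) 0

lemma stepA_cons_cons (a b : Int) (e t : List Int) (i : Nat) :
    pvStepA (a :: e, b :: t) (i+1) = (a :: (pvStepA (e, t) i).1, b :: (pvStepA (e, t) i).2) := by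
  simp only [pvStepA, List.getD_cons_succ]
  split_ifs <;> simp

lemma stepA_cons_nil (a : Int) (e : List Int) (i : Nat) :
    pvStepA (a :: e, []) (i+1) = (a :: (pvStepA (e, []) i).1, []) := by
  simp only [pvStepA, List.getD_cons_succ]
  split_ifs <;> simp

lemma foldl_stepA_shift_cons (l : List Nat) (a b : Int) (e t : List Int) :
    l.foldl (fun st i => pvStepA st (i+1)) (a :: e, b :: t)
      = (a :: (l.foldl pvStepA (e, t)).1, b :: (l.foldl pvStepA (e, t)).2) := by
  induction l generalizing e t with
  | nil => simp
  | cons j l ih =>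
      rw [List.foldl_cons, List.foldl_cons, stepA_cons_cons]
      exact ih (pvStepA (e, t) j).1 (pvStepA (e, t) j).2

lemma foldl_stepA_shift_nil (l : List Nat) (a : Int) (e : List Int) :
    l.foldl (fun st i => pvStepA st (i+1)) (a :: e, [])
      = (a :: (l.foldl pvStepA (e, ([] : List Int))).1, []) := by
  induction l generalizing e with
  | nil => simp
  | cons j l ih =>
      rcases he : pvStepA (e, ([] : List Int)) j with ⟨e', t'⟩
      have h2 : t' = [] := by
        have h3 : (pvStepA (e, ([] : List Int)) j).2 = [] := by
          simp [pvStepA]; split_ifs <;> simp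
        rw [he] at h3; exact h3
      rw [List.foldl_cons, List.foldl_cons, stepA_cons_nil, he, h2]
      exact ih e'

lemma inner_eq : ∀ (e t : List Int), pvInner (e, t) = (e.map pvEF, pvTMap e t) := by
  intro e
  induction e with
  | nil => intro t; cases t <;> simp [pvInner, pvTMap]
  | cons a e ih =>
      intro t
      cases t with
      | nil =>
          have h0 : pvStepA (a :: e, []) 0
              = ((if 0 ≤ a then a - 1 else a) :: e, []) := by
            simp [pvStepA]; split_ifs <;> simp
          simp only [pvInner, List.length_cons, List.range_succ_eq_map, List.foldl_cons,
            List.foldl_map, h0, foldl_stepA_shift_nil]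
          have := ih ([] : List Int)
          simp only [pvInner] at this
          rw [this]
          simp [pvTMap, pvEF]
      | cons b t =>
          have h0 : pvStepA (a :: e, b :: t) 0
              = ((if 0 ≤ a then a - 1 else a) :: e, (if 0 ≤ a then b * a else b) :: t) := by
            simp [pvStepA]; split_ifs <;> simp
          simp only [pvInner, List.length_cons, List.range_succ_eq_map, List.foldl_cons,
            List.foldl_map, h0, foldl_stepA_shift_cons]
          have := ih t
          simp only [pvInner] at this
          rw [this]
          simp [pvTMap, pvEF]

lemma foldl_const_iterate {α β : Type} (g : α → α) (l : List β) (st : α) :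
    l.foldl (fun s _ => g s) st = g^[l.length] st := by
  induction l generalizing st with
  | nil => rfl
  | cons _ l ih => simp [Function.iterate_succ_apply, ih]

lemma pvTMap_length : ∀ (e t : List Int), (pvTMap e t).length = t.length := by
  intro e
  induction e with
  | nil => intro t; cases t <;> simp [pvTMap]
  | cons a e ih => intro t; cases t <;> simp [pvTMap, ih]

lemma Pneg_inner (e t : List Int) (h : ∀ a ∈ e.drop t.length, a < 0) :
    ∀ a ∈ (e.map pvEF).drop (pvTMap e t).length, a < 0 := by
  rw [pvTMap_length, ← List.map_drop]
  intro a ha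
  obtain ⟨a', ha', rfl⟩ := List.mem_map.mp ha
  have := h a' ha'
  simp only [pvEF]
  split_ifs <;> omega

lemma pvZ_nil_t (x : Int) (k : Nat) (r : Int) (e : List Int) : pvZ x k r e [] = r := by
  cases e <;> simp [pvZ]

lemma final_eq_pvZ (x : Int) :
    ∀ (e t : List Int) (r : Int), (∀ a ∈ e.drop t.length, a < 0) →
      (List.range e.length).foldl
        (fun r i => if 0 ≤ e.getD i 0 then r + t.getD i 0 * x ^ (e.getD i 0).toNat else r) r
      = pvZ x 0 r e t := by
  intro e
  induction e with
  | nil => intro t r _; simp [pvZ]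
  | cons a e ih =>
      intro t r hP
      cases t with
      | nil =>
          have ha : a < 0 := hP a (by simp)
          simp only [List.length_cons, List.range_succ_eq_map, List.foldl_cons, List.foldl_map,
            List.getD_cons_zero, List.getD_cons_succ, List.getD_nil]
          rw [if_neg (by omega)]
          have := ih ([] : List Int) r (by intro a' ha'; exact hP a' (by simp at ha' ⊢; exact Or.inr ha'))
          simp only [List.getD_nil] at this
          rw [this, pvZ_nil_t, pvZ_nil_t]
      | cons b t =>
          simp only [List.length_cons, List.range_succ_eq_map, List.foldl_cons, List.foldl_map,
            List.getD_cons_zero, List.getD_cons_succ]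
          rw [ih t _ (by intro a' ha'; exact hP a' (by simpa using ha'))]
          simp only [pvZ, pvFF, Nat.cast_zero]
          congr 1
          split_ifs <;> ring_nf

lemma contrib_shift (x : Int) (k : Nat) (a b r : Int) :
    (if ((k : Int) + 1) ≤ a then r + b * pvFF a (k+1) * x ^ (a - ((k : Int) + 1)).toNat else r)
    = if (k : Int) ≤ pvEF a then
        r + (if 0 ≤ a then b * a else b) * pvFF (pvEF a) k * x ^ (pvEF a - (k : Int)).toNat
      else r := by
  by_cases h : 0 ≤ a
  · simp only [pvEF, if_pos h, pvFF]
    have hc : ((k : Int) + 1 ≤ a) ↔ ((k : Int) ≤ a - 1) := by omega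
    by_cases h2 : (k : Int) + 1 ≤ a
    · rw [if_pos h2, if_pos (hc.mp h2)]
      have : (a - ((k : Int) + 1)).toNat = (a - 1 - (k : Int)).toNat := by omega
      rw [this]; ring
    · rw [if_neg h2, if_neg (fun hx => h2 (hc.mpr hx))]
  · simp only [pvEF, if_neg h]
    rw [if_neg (by omega), if_neg (by omega)]

lemma pvZ_shift (x : Int) (k : Nat) :
    ∀ (e t : List Int) (r : Int), pvZ x k r (e.map pvEF) (pvTMap e t) = pvZ x (k+1) r e t := by
  intro e
  induction e with
  | nil => intro t r; cases t <;> simp [pvTMap, pvZ]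
  | cons a e ih =>
      intro t r
      cases t with
      | nil => simp [pvTMap, pvZ_nil_t, pvZ]
      | cons b t =>
          simp only [List.map_cons, pvTMap, pvZ]
          rw [ih t]
          congr 1
          have := contrib_shift x k a b r
          push_cast
          exact this.symm

lemma iter_key (x : Int) :
    ∀ (k : Nat) (e t : List Int), (∀ a ∈ e.drop t.length, a < 0) →
      pvFinal x (pvInner^[k] (e, t)) = pvZ x k 0 e t := by
  intro k
  induction k with
  | zero =>
      intro e t hP
      simpa [pvFinal] using final_eq_pvZ x e t 0 hP
  | succ k ih =>
      intro e t hP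
      rw [Function.iterate_succ_apply, inner_eq]
      rw [ih _ _ (Pneg_inner e t hP), pvZ_shift]

lemma B_eq_pvZ (exp term : List Int) (x n : Int) :
    DerivarPol_alt exp term x n = pvZ x n.toNat 0 exp term := by
  have hk : (if (0:Int) < n then n else 0) = ((n.toNat : Int)) := by
    split_ifs <;> omega
  show (exp.zip term).foldl _ 0 = _
  rw [hk]
  generalize (0 : Int) = r
  induction exp generalizing term r with
  | nil => simp [pvZ]
  | cons a e ih =>
      cases term with
      | nil => simp [pvZ]
      | cons b t =>
          simp only [List.zip_cons_cons, List.foldl_cons, pvZ]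
          rw [ih t]
          congr 1
          by_cases h : ((n.toNat : Int)) ≤ a
          · rw [if_pos h, if_pos h]
            congr 1
            congr 1
            -- falling product: foldl over range(a, a-k, -1)
            have : ∀ (k : Nat) (a c : Int),
                (PySem.List.pyRange a (a - (k : Int)) (-1)).foldl (fun c j => c * j) c
                  = c * pvFF a k := by
              intro k
              induction k with
              | zero => intro a c; rw [PySem.List.pyRange_neg_one_eq_nil (by omega)]; simp [pvFF]
              | succ k ihk =>
                  intro a c
                  rw [PySem.List.pyRange_neg_one_cons (by push_cast; omega), List.foldl_cons]
                  have := ihk (a - 1) (c * a)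
                  have harg : a - 1 - (k : Int) = a - ((k + 1 : Nat) : Int) := by push_cast; omega
                  rw [harg] at this
                  rw [this]
                  simp only [pvFF]
                  ring
            exact this n.toNat a b
          · rw [if_neg h, if_neg h]

lemma A_eq_iter (exp term : List Int) (x n : Int) :
    DerivarPol exp term x n = pvFinal x (pvInner^[n.toNat] (exp, term)) := by
  show pvFinal x ((PySem.List.pyRange 0 n 1).foldl (fun st _ => pvInner st) (exp, term)) = _
  rw [foldl_const_iterate]
  congr 1
  rw [PySem.List.length_pyRange_one]
  congr 1
  omega

-- ===== VERDICT (by name: the statement is the Claim_ definition above) =====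
theorem DerivarPol_spec : Claim_equal_DerivarPol := by
  intro exp term x n _ hPre
  unfold Spec_DerivarPol
  rw [A_eq_iter, B_eq_pvZ]
  exact iter_key x n.toNat exp term hPre
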